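-- pv_equiv track=rewrite | github.com/Ramilll/cse102 | tutorial_2/dpcoin.py | transacts_list
-- ===== SOURCE A (Python) =====
-- def transacts_list(n):
--     dp = [0 for _ in range(n + 1)]
--     prev = [[0 for _ in range(n + 1)] for _ in range(n + 1)]
--
--     for i in range(1, n + 1):
--         for j in [1, 3, 7, 9]:
--             if i >= j and (dp[i - j] + 1 < dp[i] or dp[i] == 0):
--                 dp[i] = dp[i - j] + 1
--                 prev[i][dp[i]] = j
--
--     result = []
--     i = n
--     j = dp[n]
--     while i > 0:
--         result.append(prev[i][j])
--         i -= prev[i][j]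
--         j -= 1
--
--     return result
-- ===== SOURCE B (Python) =====
-- _BASE = [[], [1], [1, 1], [3], [1, 3], [1, 1, 3], [3, 3], [7], [1, 7], [9],
--          [1, 9], [1, 1, 9], [3, 9], [1, 3, 9], [7, 7], [1, 7, 7], [7, 9],
--          [1, 7, 9], [9, 9]]
--
--
-- def transacts_list(n):
--     # closed form: the answers are eventually periodic, result(n) = result(n-9) + [9]
--     # for n >= 19, so a 19-entry table plus a run of 9s gives the exact answer.
--     if n <= 18:
--         return list(_BASE[n])
--     k = (n - 10) // 9
--     return _BASE[n - 9 * k] + [9] * k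
-- ===== Notes on version B (the rewrite author's own statement) =====
-- stated objective: faster
-- what changed: B replaces A's quadratic DP-with-backtracking (n x n prev matrix plus reconstruction walk) by a closed form: the optimal coin sequences are eventually periodic (result(n) = result(n-9) + [9] for n >= 19), so B returns a 19-entry literal table lookup plus a run of 9s.
import Mathlib
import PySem

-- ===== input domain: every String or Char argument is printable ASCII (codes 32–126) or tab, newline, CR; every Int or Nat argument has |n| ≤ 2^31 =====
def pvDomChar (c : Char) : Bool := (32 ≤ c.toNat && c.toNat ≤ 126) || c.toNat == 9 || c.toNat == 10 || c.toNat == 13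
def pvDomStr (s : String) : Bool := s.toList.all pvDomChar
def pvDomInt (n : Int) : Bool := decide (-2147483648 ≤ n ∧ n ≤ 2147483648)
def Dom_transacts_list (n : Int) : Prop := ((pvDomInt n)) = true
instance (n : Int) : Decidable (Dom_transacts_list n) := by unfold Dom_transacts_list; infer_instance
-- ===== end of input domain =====

-- B replaces A's quadratic DP (n×n prev matrix + backtracking) by a closed form: the answers
-- are eventually periodic (result(n) = result(n-9) ++ [9] for n ≥ 19), so B is a 19-entry
-- table lookup plus a run of 9s; equal return value proved for all n ≥ 0 (A raises IndexError
-- on negative n).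


-- shared read primitive: xs[i] with default (all claimed reads are in range under Pre_)
def pvG (xs : List Int) (i : Int) : Int := PySem.List.pyGetD xs i 0

-- ===== PORT A =====
def pvCoins : List Int := [1, 3, 7, 9]

-- one inner-loop iteration of A: coin j at amount i (writes are in range for 1 ≤ i ≤ n)
def pvStepA (i : Int) (st : List Int × List (List Int)) (j : Int) :
    List Int × List (List Int) :=
  if i ≥ j ∧ (pvG st.1 (i - j) + 1 < pvG st.1 i ∨ pvG st.1 i = 0) then
    (st.1.set i.toNat (pvG st.1 (i - j) + 1),
     st.2.set i.toNat ((st.2.getD i.toNat []).set (pvG st.1 (i - j) + 1).toNat j))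
  else st

-- A's reconstruction while-loop; fuel bounds the iterations (n+1 is enough whenever the
-- Python loop terminates, since each step decreases i by the appended positive coin)
def pvWalkA (prev : List (List Int)) : Nat → Int → Int → List Int
  | 0, _, _ => []
  | fuel + 1, i, j =>
    if i > 0 then
      pvG (prev.getD i.toNat []) j ::
        pvWalkA prev fuel (i - pvG (prev.getD i.toNat []) j) (j - 1)
    else []

def transacts_list (n : Int) : List Int :=
  let dp0 : List Int := (PySem.List.pyRange 0 (n + 1) 1).map (fun _ => 0)
  let prev0 : List (List Int) := (PySem.List.pyRange 0 (n + 1) 1).map (fun _ => dp0)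
  let st := (PySem.List.pyRange 1 (n + 1) 1).foldl
      (fun st i => pvCoins.foldl (pvStepA i) st) (dp0, prev0)
  -- dp[n]: on negative n Python raises IndexError here (excluded by Pre_)
  pvWalkA st.2 (n.toNat + 1) n (pvG st.1 n)

-- ===== PORT B =====
-- the 19 literal answers for n = 0..18 (_BASE in Source B)
def pvBase : List (List Int) :=
  [[], [1], [1, 1], [3], [1, 3], [1, 1, 3], [3, 3], [7], [1, 7], [9],
   [1, 9], [1, 1, 9], [3, 9], [1, 3, 9], [7, 7], [1, 7, 7], [7, 9], [1, 7, 9], [9, 9]]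

def transacts_list_alt (n : Int) : List Int :=
  if n ≤ 18 then PySem.List.pyGetD pvBase n []
  else
    let k := PySem.Int.floordiv (n - 10) 9
    PySem.List.pyGetD pvBase (n - 9 * k) [] ++ PySem.List.pyRepeat [9] k

-- ===== PRECONDITION & SPEC =====
-- Pre_ excludes exactly the negative n, where A raises IndexError (dp[n] on the empty dp list).
def Pre_transacts_list (n : Int) : Prop := 0 ≤ n
instance (n : Int) : Decidable (Pre_transacts_list n) := by
  unfold Pre_transacts_list; infer_instance

def pvWitness_transacts_list : Int := 15

def Spec_transacts_list (n : Int) (out : List Int) : Prop := out = transacts_list_alt n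
instance (n : Int) (out : List Int) : Decidable (Spec_transacts_list n out) := by
  unfold Spec_transacts_list; infer_instance

-- ===== CLAIM (what is proved, stated in full; the proofs are below) =====
def Claim_equal_transacts_list : Prop :=
  ∀ (n : Int), Dom_transacts_list n → Pre_transacts_list n →
    Spec_transacts_list n (transacts_list n)

-- ===== LEMMAS AND PROOFS =====

-- proof-only intermediate: the 1D choice DP that A's (dp, prev) fold computes; A is first
-- reduced to a walk over this fold's choice array, which is then characterised in closed form.
def pvStepB (st : List Int × List Int) (i : Int) : List Int × List Int :=
  let c := (PySem.List.min? (([1, 3, 7, 9] : List Int).filter (fun c => c ≤ i))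
      (fun c => pvG st.1 (i - c))).getD 0
  (st.1.set i.toNat (pvG st.1 (i - c) + 1), st.2.set i.toNat c)

def pvWalkB (ch : List Int) : Nat → Int → List Int
  | 0, _ => []
  | fuel + 1, i =>
    if i > 0 then pvG ch i :: pvWalkB ch fuel (i - pvG ch i) else []

-- the loop invariant tying A's state (dp, prev) and the intermediate state (dp, choice)
def pvInv (n : Int) (m : Nat) (dp : List Int) (prev : List (List Int)) (ch : List Int) : Prop :=
  dp.length = (n + 1).toNat ∧ ch.length = (n + 1).toNat ∧ prev.length = (n + 1).toNat ∧
  (∀ r ∈ prev, r.length = (n + 1).toNat) ∧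
  (∀ x ∈ dp, 0 ≤ x) ∧
  (∀ k : Nat, m < k → dp.getD k 0 = 0) ∧
  dp.getD 0 0 = 0 ∧
  (∀ k : Nat, 1 ≤ k → k ≤ m →
    1 ≤ ch.getD k 0 ∧ ch.getD k 0 ≤ (k : Int) ∧
    1 ≤ dp.getD k 0 ∧ dp.getD k 0 ≤ (k : Int) ∧
    dp.getD k 0 = dp.getD (k - (ch.getD k 0).toNat) 0 + 1 ∧
    (prev.getD k []).getD (dp.getD k 0).toNat 0 = ch.getD k 0)

lemma pvG_eq_getD (xs : List Int) (i : Int) (h : 0 ≤ i) : pvG xs i = xs.getD i.toNat 0 := by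
  rw [pvG, ← Int.toNat_of_nonneg h, PySem.List.pyGetD_natCast]; congr 1; try omega

lemma pv_getD_replicate (k : Nat) (N : Nat) : (List.replicate N (0 : Int)).getD k 0 = 0 := by
  rcases lt_or_ge k N with h | h
  · rw [List.getD_eq_getElem _ _ (by simpa using h)]
    simp
  · rw [List.getD_eq_default _ _ (by simpa using h)]

lemma pv_init (n : Int) :
    (PySem.List.pyRange 0 (n + 1) 1).map (fun _ => (0 : Int))
      = List.replicate (n + 1).toNat 0 := by
  rw [PySem.List.pyRange_one, List.map_map]
  simp [Function.comp_def, List.map_const']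

lemma pv_getD_set_self {α : Type} (xs : List α) (a : Nat) (v d : α) (h : a < xs.length) :
    (xs.set a v).getD a d = v := by
  rw [List.getD_eq_getElem _ _ (by simpa using h)]
  simp

lemma pv_getD_set_ne {α : Type} (xs : List α) (a b : Nat) (v d : α) (h : a ≠ b) :
    (xs.set a v).getD b d = xs.getD b d := by
  simp [List.getD, List.getElem?_set_ne h]

lemma pvG_set_self (xs : List Int) (v : Int) (i : Int) (h0 : 0 ≤ i)
    (h : i.toNat < xs.length) : pvG (xs.set i.toNat v) i = v := by
  rw [pvG_eq_getD _ _ h0]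
  exact pv_getD_set_self _ _ _ _ h

lemma pvG_set_ne (xs : List Int) (a : Nat) (v : Int) (j : Int) (h0 : 0 ≤ j)
    (h : j.toNat ≠ a) : pvG (xs.set a v) j = pvG xs j := by
  rw [pvG_eq_getD _ _ h0, pvG_eq_getD _ _ h0, pv_getD_set_ne _ _ _ _ _ (Ne.symm h)]

lemma pv_vbounds (n : Int) (m : Nat) (dp : List Int) (prev : List (List Int)) (ch : List Int)
    (hinv : pvInv n m dp prev ch) (i : Int) (hi : i = (m : Int) + 1)
    (c : Int) (hc1 : 1 ≤ c) (hci : c ≤ i) :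
    0 ≤ pvG dp (i - c) ∧ pvG dp (i - c) ≤ i - c := by
  obtain ⟨hdl, hcl, hpl, hrl, hnn, hz, hz0, hK⟩ := hinv
  rw [pvG_eq_getD _ _ (by omega)]
  rcases Nat.eq_zero_or_pos (i - c).toNat with h | h
  · rw [h]
    rw [hz0]
    omega
  · obtain ⟨_, _, hd1, hdi, _, _⟩ := hK (i - c).toNat (by omega) (by omega)
    omega

lemma pv_upd (n : Int) (m : Nat) (dp : List Int) (prev : List (List Int)) (ch : List Int)
    (hinv : pvInv n m dp prev ch) (hmn : (m : Int) + 1 ≤ n)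
    (c : Int) (hc1 : 1 ≤ c) (hci : c ≤ (m : Int) + 1)
    (row : List Int) (hrlen : row.length = (n + 1).toNat)
    (hrget : row.getD (pvG dp ((m : Int) + 1 - c) + 1).toNat 0 = c) :
    pvInv n (m + 1)
      (dp.set ((m : Int) + 1).toNat (pvG dp ((m : Int) + 1 - c) + 1))
      (prev.set ((m : Int) + 1).toNat row)
      (ch.set ((m : Int) + 1).toNat c) := by
  have hv := pv_vbounds n m dp prev ch hinv ((m : Int) + 1) rfl c hc1 hci
  obtain ⟨hdl, hcl, hpl, hrl, hnn, hz, hz0, hK⟩ := hinv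
  have hIt : ((m : Int) + 1).toNat = m + 1 := by omega
  rw [hIt]
  have hmN : m + 1 < (n + 1).toNat := by omega
  refine ⟨by simpa using hdl, by simpa using hcl, by simpa using hpl, ?_, ?_, ?_, ?_, ?_⟩
  · intro r hr
    rcases List.mem_or_eq_of_mem_set hr with h | h
    · exact hrl r h
    · rw [h]; exact hrlen
  · intro x hx
    rcases List.mem_or_eq_of_mem_set hx with h | h
    · exact hnn x h
    · omega
  · intro k hk
    rw [pv_getD_set_ne _ _ _ _ _ (by omega)]
    exact hz k (by omega)
  · rw [pv_getD_set_ne _ _ _ _ _ (by omega)]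
    exact hz0
  · intro k hk1 hk2
    rcases Nat.lt_or_ge k (m + 1) with hlt | hge
    · obtain ⟨h1, h2, h3, h4, h5, h6⟩ := hK k hk1 (by omega)
      rw [pv_getD_set_ne (a := m+1) (b := k) _ _ _ (by omega),
          pv_getD_set_ne (a := m+1) (b := k) _ _ _ (by omega)]
      refine ⟨h1, h2, h3, h4, ?_, ?_⟩
      · rw [pv_getD_set_ne _ _ _ _ _ (by omega)]
        exact h5
      · rw [pv_getD_set_ne (a := m+1) (b := k) _ _ _ (by omega)]
        exact h6
    · have hkm : k = m + 1 := by omega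
      subst hkm
      rw [pv_getD_set_self _ _ _ _ (by omega), pv_getD_set_self _ _ _ _ (by omega)]
      have hvG : pvG dp ((m : Int) + 1 - c) = dp.getD ((m : Int) + 1 - c).toNat 0 :=
        pvG_eq_getD _ _ (by omega)
      refine ⟨hc1, by push_cast; omega, by omega, by push_cast; omega, ?_, ?_⟩
      · rw [pv_getD_set_ne _ _ _ _ _ (by omega)]
        rw [hvG]
        have : (m + 1) - c.toNat = ((m : Int) + 1 - c).toNat := by omega
        rw [this]
      · rw [pv_getD_set_self _ _ _ _ (by omega)]
        exact hrget

lemma pv_stepA_skip (i j : Int) (st : List Int × List (List Int)) (h : ¬ j ≤ i) :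
    pvStepA i st j = st := by
  rw [pvStepA, if_neg (fun hc => h hc.1)]

lemma pv_stepA_fire (i j : Int) (st : List Int × List (List Int)) (h1 : j ≤ i)
    (h2 : pvG st.1 (i - j) + 1 < pvG st.1 i ∨ pvG st.1 i = 0) :
    pvStepA i st j
      = (st.1.set i.toNat (pvG st.1 (i - j) + 1),
         st.2.set i.toNat ((st.2.getD i.toNat []).set (pvG st.1 (i - j) + 1).toNat j)) := by
  rw [pvStepA, if_pos ⟨h1, h2⟩]

lemma pv_stepA_stay (i j : Int) (st : List Int × List (List Int))
    (h2 : ¬ (pvG st.1 (i - j) + 1 < pvG st.1 i ∨ pvG st.1 i = 0)) :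
    pvStepA i st j = st := by
  rw [pvStepA, if_neg (fun hc => h2 hc.2)]

lemma pv_coin_fold (i : Int) (dp : List Int) (prev : List (List Int)) (N : Nat)
    (hdl : dp.length = N) (hpl : prev.length = N)
    (hiN : i.toNat < N) (hi1 : 1 ≤ i)
    (hvnn : ∀ c : Int, 1 ≤ c → c ≤ i → 0 ≤ pvG dp (i - c))
    (hvub : ∀ c : Int, 1 ≤ c → c ≤ i → pvG dp (i - c) ≤ i - c) :
    ∀ (cs : List Int), (∀ c ∈ cs, 1 ≤ c) →
    ∀ (c₀ : Int), 1 ≤ c₀ → c₀ ≤ i →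
    ∀ (row : List Int), row.length = N →
      row.getD (pvG dp (i - c₀) + 1).toNat 0 = c₀ →
    ∃ c' row',
      cs.foldl (pvStepA i) (dp.set i.toNat (pvG dp (i - c₀) + 1), prev.set i.toNat row)
        = (dp.set i.toNat (pvG dp (i - c') + 1), prev.set i.toNat row') ∧
      PySem.List.min? (c₀ :: cs.filter (fun c => c ≤ i))
        (fun c => pvG dp (i - c)) = some c' ∧
      row'.length = N ∧ row'.getD (pvG dp (i - c') + 1).toNat 0 = c' ∧ 1 ≤ c' ∧ c' ≤ i := by
  intro cs
  induction cs with
  | nil =>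
    intro _ c₀ h1 h2 row hl hg
    exact ⟨c₀, row, rfl, by simp [PySem.List.min?], hl, hg, h1, h2⟩
  | cons c cs ih =>
    intro hcs c₀ h01 h0i row hrl hrg
    have hc1 : 1 ≤ c := hcs c (by simp)
    have hcs' : ∀ x ∈ cs, 1 ≤ x := fun x hx => hcs x (by simp [hx])
    by_cases hci : c ≤ i
    · have hrd1 : pvG (dp.set i.toNat (pvG dp (i - c₀) + 1)) (i - c) = pvG dp (i - c) :=
        pvG_set_ne _ _ _ _ (by omega) (by omega)
      have hrd2 : pvG (dp.set i.toNat (pvG dp (i - c₀) + 1)) i = pvG dp (i - c₀) + 1 :=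
        pvG_set_self _ _ _ (by omega) (by omega)
      have hfilter : (c :: cs).filter (fun x => x ≤ i) = c :: cs.filter (fun x => x ≤ i) := by
        simp [hci]
      have hrowread : ((prev.set i.toNat row).getD i.toNat []) = row :=
        pv_getD_set_self _ _ _ _ (by omega)
      by_cases hlt : pvG dp (i - c) < pvG dp (i - c₀)
      · rw [List.foldl_cons,
            pv_stepA_fire i c _ hci (by simp only [hrd1, hrd2]; omega)]
        simp only [hrd1, List.set_set, hrowread]
        have hnewget : (row.set (pvG dp (i - c) + 1).toNat c).getD
            (pvG dp (i - c) + 1).toNat 0 = c := by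
          refine pv_getD_set_self _ _ _ _ ?_
          have h1 := hvnn c hc1 hci
          have h2 := hvub c hc1 hci
          omega
        obtain ⟨c', row', hA, hB, hl', hg', hc'1, hc'i⟩ :=
          ih hcs' c hc1 hci (row.set (pvG dp (i - c) + 1).toNat c)
            (by rw [List.length_set]; exact hrl) hnewget
        refine ⟨c', row', hA, ?_, hl', hg', hc'1, hc'i⟩
        rw [hfilter]
        have hred : PySem.List.min? (c₀ :: c :: cs.filter (fun x => x ≤ i))
            (fun x => pvG dp (i - x))
            = PySem.List.min? (c :: cs.filter (fun x => x ≤ i))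
              (fun x => pvG dp (i - x)) := by
          simp only [PySem.List.min?, List.foldl_cons]
          rw [if_pos hlt]
        rw [hred]
        exact hB
      · rw [List.foldl_cons,
            pv_stepA_stay i c _ (by
              simp only [hrd1, hrd2]
              have := hvnn c₀ h01 h0i
              omega)]
        obtain ⟨c', row', hA, hB, hl', hg', hc'1, hc'i⟩ :=
          ih hcs' c₀ h01 h0i row hrl hrg
        refine ⟨c', row', hA, ?_, hl', hg', hc'1, hc'i⟩
        rw [hfilter]
        have hred : PySem.List.min? (c₀ :: c :: cs.filter (fun x => x ≤ i))
            (fun x => pvG dp (i - x))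
            = PySem.List.min? (c₀ :: cs.filter (fun x => x ≤ i))
              (fun x => pvG dp (i - x)) := by
          simp only [PySem.List.min?, List.foldl_cons]
          rw [if_neg hlt]
        rw [hred]
        exact hB
    · rw [List.foldl_cons, pv_stepA_skip i c _ hci]
      have hfilter : (c :: cs).filter (fun x => x ≤ i) = cs.filter (fun x => x ≤ i) := by
        simp [hci]
      obtain ⟨c', row', hA, hB, hl', hg', hc'1, hc'i⟩ :=
        ih hcs' c₀ h01 h0i row hrl hrg
      exact ⟨c', row', hA, by rw [hfilter]; exact hB, hl', hg', hc'1, hc'i⟩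

lemma pv_step (n : Int) (m : Nat) (dp : List Int) (prev : List (List Int)) (ch : List Int)
    (hmn : (m : Int) + 1 ≤ n) (hinv : pvInv n m dp prev ch) :
    (pvCoins.foldl (pvStepA ((m : Int) + 1)) (dp, prev)).1
        = (pvStepB (dp, ch) ((m : Int) + 1)).1 ∧
    pvInv n (m + 1) (pvCoins.foldl (pvStepA ((m : Int) + 1)) (dp, prev)).1
      (pvCoins.foldl (pvStepA ((m : Int) + 1)) (dp, prev)).2
      (pvStepB (dp, ch) ((m : Int) + 1)).2 := by
  obtain ⟨hdl, hcl, hpl, hrl, hnn, hz, hz0, hK⟩ := hinv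
  set i := (m : Int) + 1 with hi
  have hi1 : 1 ≤ i := by omega
  have hiN : i.toNat < (n + 1).toNat := by omega
  have hvnn : ∀ c : Int, 1 ≤ c → c ≤ i → 0 ≤ pvG dp (i - c) := fun c hc1 hc2 =>
    (pv_vbounds n m dp prev ch ⟨hdl, hcl, hpl, hrl, hnn, hz, hz0, hK⟩ i hi c hc1 hc2).1
  have hvub : ∀ c : Int, 1 ≤ c → c ≤ i → pvG dp (i - c) ≤ i - c := fun c hc1 hc2 =>
    (pv_vbounds n m dp prev ch ⟨hdl, hcl, hpl, hrl, hnn, hz, hz0, hK⟩ i hi c hc1 hc2).2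
  have hd0 : pvG dp i = 0 := by
    rw [pvG_eq_getD _ _ (by omega)]
    exact hz i.toNat (by omega)
  have h1A : pvStepA i (dp, prev) 1
      = (dp.set i.toNat (pvG dp (i - 1) + 1),
         prev.set i.toNat ((prev.getD i.toNat []).set (pvG dp (i - 1) + 1).toNat 1)) :=
    pv_stepA_fire i 1 (dp, prev) hi1 (Or.inr hd0)
  have hxl : (prev.getD i.toNat []).length = (n + 1).toNat := by
    rw [List.getD_eq_getElem _ _ (by omega)]
    exact hrl _ (List.getElem_mem _)
  have hrow0len : ((prev.getD i.toNat []).set (pvG dp (i - 1) + 1).toNat 1).length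
      = (n + 1).toNat := by
    rw [List.length_set]
    exact hxl
  have hrow0get : ((prev.getD i.toNat []).set (pvG dp (i - 1) + 1).toNat 1).getD
      (pvG dp (i - 1) + 1).toNat 0 = 1 := by
    refine pv_getD_set_self _ _ _ _ ?_
    have h1 := hvnn 1 le_rfl hi1
    have h2 := hvub 1 le_rfl hi1
    omega
  obtain ⟨c', row', hA, hB, hrl', hrg', hc'1, hc'i⟩ :=
    pv_coin_fold i dp prev (n + 1).toNat hdl hpl hiN hi1 hvnn hvub
      [3, 7, 9] (by intro c hc; simp at hc; rcases hc with rfl | rfl | rfl <;> norm_num)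
      1 le_rfl hi1 _ hrow0len hrow0get
  have hAall : pvCoins.foldl (pvStepA i) (dp, prev)
      = (dp.set i.toNat (pvG dp (i - c') + 1), prev.set i.toNat row') := by
    simp only [pvCoins]
    rw [List.foldl_cons, h1A]
    exact hA
  have hminf : (([1, 3, 7, 9] : List Int).filter (fun c => c ≤ i))
      = 1 :: ([3, 7, 9] : List Int).filter (fun c => c ≤ i) := by
    simp [List.filter_cons, hi1]
  have hmin : PySem.List.min? (([1, 3, 7, 9] : List Int).filter (fun c => c ≤ i))
      (fun c => pvG dp (i - c)) = some c' := by
    rw [hminf]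
    exact hB
  have hBall : pvStepB (dp, ch) i = (dp.set i.toNat (pvG dp (i - c') + 1), ch.set i.toNat c') := by
    simp only [pvStepB, hmin]
    rfl
  rw [hAall, hBall]
  refine ⟨rfl, ?_⟩
  rw [hi]
  exact pv_upd n m dp prev ch ⟨hdl, hcl, hpl, hrl, hnn, hz, hz0, hK⟩ hmn c' hc'1
    (by rw [← hi]; exact hc'i) row' hrl' (by rw [← hi]; exact hrg')

lemma pv_fold (n : Int) (_hn : 0 ≤ n) (m : Nat) (hm : (m : Int) ≤ n) :
    ((PySem.List.pyRange 1 ((m : Int) + 1) 1).foldl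
        (fun st i => pvCoins.foldl (pvStepA i) st)
        ((PySem.List.pyRange 0 (n + 1) 1).map (fun _ => 0),
         (PySem.List.pyRange 0 (n + 1) 1).map
           (fun _ => (PySem.List.pyRange 0 (n + 1) 1).map (fun _ => (0 : Int))))).1
      = ((PySem.List.pyRange 1 ((m : Int) + 1) 1).foldl pvStepB
          (List.replicate (n + 1).toNat 0, List.replicate (n + 1).toNat 0)).1 ∧
    pvInv n m
      ((PySem.List.pyRange 1 ((m : Int) + 1) 1).foldl
        (fun st i => pvCoins.foldl (pvStepA i) st)
        ((PySem.List.pyRange 0 (n + 1) 1).map (fun _ => 0),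
         (PySem.List.pyRange 0 (n + 1) 1).map
           (fun _ => (PySem.List.pyRange 0 (n + 1) 1).map (fun _ => (0 : Int))))).1
      ((PySem.List.pyRange 1 ((m : Int) + 1) 1).foldl
        (fun st i => pvCoins.foldl (pvStepA i) st)
        ((PySem.List.pyRange 0 (n + 1) 1).map (fun _ => 0),
         (PySem.List.pyRange 0 (n + 1) 1).map
           (fun _ => (PySem.List.pyRange 0 (n + 1) 1).map (fun _ => (0 : Int))))).2
      ((PySem.List.pyRange 1 ((m : Int) + 1) 1).foldl pvStepB
          (List.replicate (n + 1).toNat 0, List.replicate (n + 1).toNat 0)).2 := by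
  induction m with
  | zero =>
    rw [show ((0 : Nat) : Int) + 1 = 1 by norm_num,
      PySem.List.pyRange_one_eq_nil (a := 1) (b := 1) le_rfl]
    simp only [List.foldl_nil, pv_init n]
    refine ⟨trivial, ?_, ?_, ?_, ?_, ?_, ?_, ?_, ?_⟩
    · simp
    · simp
    · simp [PySem.List.length_pyRange_one]
    · intro r hr
      simp only [List.mem_map] at hr
      obtain ⟨_, _, rfl⟩ := hr
      simp
    · intro x hx
      have := List.eq_of_mem_replicate hx
      omega
    · intro k _
      exact pv_getD_replicate k _
    · exact pv_getD_replicate 0 _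
    · intro k hk1 hk0
      omega
  | succ m ih =>
    have hm' : (m : Int) ≤ n := by push_cast at hm ⊢; omega
    have hmn : (m : Int) + 1 ≤ n := by push_cast at hm; omega
    have hsplit : PySem.List.pyRange 1 (((m + 1 : Nat) : Int) + 1) 1
        = PySem.List.pyRange 1 ((m : Int) + 1) 1 ++ [(m : Int) + 1] := by
      have h2 : (((m + 1 : Nat) : Int) + 1) = ((m : Int) + 1) + 1 := by push_cast; ring
      rw [h2, PySem.List.pyRange_one_succ_right (by omega)]
    rw [hsplit]
    simp only [List.foldl_append, List.foldl_cons, List.foldl_nil]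
    set stA := (PySem.List.pyRange 1 ((m : Int) + 1) 1).foldl
        (fun st i => pvCoins.foldl (pvStepA i) st)
        ((PySem.List.pyRange 0 (n + 1) 1).map (fun _ => 0),
         (PySem.List.pyRange 0 (n + 1) 1).map
           (fun _ => (PySem.List.pyRange 0 (n + 1) 1).map (fun _ => (0 : Int)))) with hA
    set stB := (PySem.List.pyRange 1 ((m : Int) + 1) 1).foldl pvStepB
        (List.replicate (n + 1).toNat 0, List.replicate (n + 1).toNat 0) with hB
    obtain ⟨heq, hinv⟩ := ih hm'
    have hsb : stB = (stA.1, stB.2) := by rw [heq]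
    rw [hsb]
    exact pv_step n m stA.1 stA.2 stB.2 hmn hinv

lemma pv_walk (n : Int) (dp : List Int) (prev : List (List Int)) (ch : List Int)
    (hinv : pvInv n n.toNat dp prev ch) :
    ∀ (fuel : Nat) (i : Int), 0 ≤ i → i ≤ n →
      pvWalkA prev fuel i (pvG dp i) = pvWalkB ch fuel i := by
  obtain ⟨hdl, hcl, hpl, hrl, hnn, hz, hz0, hK⟩ := hinv
  intro fuel
  induction fuel with
  | zero => intro i _ _; simp [pvWalkA, pvWalkB]
  | succ f ih =>
    intro i h0 hn'
    by_cases hi : 0 < i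
    · obtain ⟨hc1, hci, hd1, hdi, hrec, hprev⟩ := hK i.toNat (by omega) (by omega)
      have hgd : pvG dp i = dp.getD i.toNat 0 := pvG_eq_getD _ _ h0
      have hgc : pvG ch i = ch.getD i.toNat 0 := pvG_eq_getD _ _ h0
      have hrow : pvG (prev.getD i.toNat []) (dp.getD i.toNat 0)
          = (prev.getD i.toNat []).getD (dp.getD i.toNat 0).toNat 0 :=
        pvG_eq_getD _ _ (by omega)
      have harg : dp.getD i.toNat 0 - 1 = pvG dp (i - ch.getD i.toNat 0) := by
        rw [pvG_eq_getD _ _ (by omega)]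
        have he : (i - ch.getD i.toNat 0).toNat = i.toNat - (ch.getD i.toNat 0).toNat := by
          omega
        rw [he]
        omega
      simp only [pvWalkA, pvWalkB, if_pos hi, hgd, hgc, hrow, hprev, harg]
      exact congrArg _ (ih (i - ch.getD i.toNat 0) (by omega) (by omega))
    · simp [pvWalkA, pvWalkB, hi]

-- A's result is the walk over the intermediate fold's choice array
lemma pv_A_eq_walkB (n : Int) (hn : 0 ≤ n) :
    transacts_list n
      = pvWalkB ((PySem.List.pyRange 1 (n + 1) 1).foldl pvStepB
          (List.replicate (n + 1).toNat 0, List.replicate (n + 1).toNat 0)).2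
        (n.toNat + 1) n := by
  unfold transacts_list
  have hc : ((n.toNat : Int) + 1) = n + 1 := by omega
  have hf := pv_fold n hn n.toNat (by omega)
  rw [hc] at hf
  exact pv_walk n _ _ _ hf.2 (n.toNat + 1) n hn le_rfl

-- ===== closed-form stage: dp and choice in closed form =====

def pvTdp : List Int := [0, 1, 2, 1, 2, 3, 2, 1, 2, 1, 2, 3, 2, 3, 2, 3, 2, 3, 2]
def pvTch : List Int := [0, 1, 1, 3, 1, 1, 3, 7, 1, 9, 1, 1, 3, 1, 7, 1, 7, 1, 9]

def pvDpF (i : Int) : Int :=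
  if i ≤ 18 then pvTdp.getD i.toNat 0
  else pvTdp.getD (10 + (i - 10) % 9).toNat 0 + (i - 10) / 9

def pvChF (i : Int) : Int :=
  if i ≤ 18 then pvTch.getD i.toNat 0
  else pvTch.getD (10 + (i - 10) % 9).toNat 0

lemma pvChF_cases (i : Int) (h : 1 ≤ i) :
    (pvChF i = 1 ∨ pvChF i = 3 ∨ pvChF i = 7 ∨ pvChF i = 9) ∧ pvChF i ≤ i := by
  by_cases h18 : i ≤ 18
  · interval_cases i <;> simp [pvChF, pvTch]
  · have hr : (i - 10) % 9 = 0 ∨ (i - 10) % 9 = 1 ∨ (i - 10) % 9 = 2 ∨ (i - 10) % 9 = 3 ∨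
        (i - 10) % 9 = 4 ∨ (i - 10) % 9 = 5 ∨ (i - 10) % 9 = 6 ∨ (i - 10) % 9 = 7 ∨
        (i - 10) % 9 = 8 := by omega
    unfold pvChF
    rw [if_neg h18]
    rcases hr with h | h | h | h | h | h | h | h | h <;> rw [h] <;> simp [pvTch] <;> omega

lemma pvDpF_shift (i : Int) (h : 19 ≤ i) : pvDpF i = pvDpF (i - 9) + 1 := by
  by_cases h27 : i ≤ 27
  · interval_cases i <;> decide
  · unfold pvDpF
    rw [if_neg (by omega), if_neg (by omega)]
    have e1 : (i - 9 - 10) % 9 = (i - 10) % 9 := by omega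
    have e2 : (i - 9 - 10) / 9 = (i - 10) / 9 - 1 := by omega
    rw [e1, e2]
    ring

lemma pvChF_shift (i : Int) (h : 19 ≤ i) : pvChF i = pvChF (i - 9) := by
  by_cases h27 : i ≤ 27
  · interval_cases i <;> decide
  · unfold pvChF
    rw [if_neg (by omega), if_neg (by omega)]
    have e1 : (i - 9 - 10) % 9 = (i - 10) % 9 := by omega
    rw [e1]

-- min? congruence on the key (the fold keeps its accumulator inside the scanned list)
lemma pvMinFold_congr (f g : Int → Int) :
    ∀ (xs : List Int) (acc : Option Int), (∀ x ∈ xs, f x = g x) →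
      (∀ m, acc = some m → f m = g m) →
      xs.foldl (fun acc x => match acc with
          | none => some x
          | some m => if f x < f m then some x else some m) acc
        = xs.foldl (fun acc x => match acc with
          | none => some x
          | some m => if g x < g m then some x else some m) acc := by
  intro xs
  induction xs with
  | nil => intro acc _ _; rfl
  | cons x xs ih =>
    intro acc hx hacc
    have hfx : f x = g x := hx x (by simp)
    rcases acc with _ | m
    · simp only [List.foldl_cons]
      exact ih (some x) (fun y hy => hx y (by simp [hy])) (by intro m hm; cases hm; exact hfx)
    · have hfm : f m = g m := hacc m rfl
      simp only [List.foldl_cons, hfx, hfm]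
      by_cases hlt : g x < g m
      · rw [if_pos hlt]
        exact ih (some x) (fun y hy => hx y (by simp [hy])) (by intro k hk; cases hk; exact hfx)
      · rw [if_neg hlt]
        exact ih (some m) (fun y hy => hx y (by simp [hy])) (by intro k hk; cases hk; exact hfm)

lemma pvMin?_congr (l : List Int) (f g : Int → Int) (h : ∀ x ∈ l, f x = g x) :
    PySem.List.min? l f = PySem.List.min? l g := by
  unfold PySem.List.min?
  have := pvMinFold_congr f g l none h (by intro m hm; cases hm)
  convert this using 2 <;> (funext acc x; rcases acc with _ | m <;> rfl)

lemma pvMin?_addone (l : List Int) (g : Int → Int) :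
    PySem.List.min? l (fun c => g c + 1) = PySem.List.min? l g := by
  unfold PySem.List.min?
  congr 1
  funext acc x
  cases acc with
  | none => rfl
  | some m =>
    show (if g x + 1 < g m + 1 then some x else some m : Option Int)
        = (if g x < g m then some x else some m : Option Int)
    by_cases h : g x < g m
    · rw [if_pos (by omega), if_pos h]
    · rw [if_neg (by omega), if_neg h]

lemma pv_filter_full (i : Int) (h : 9 ≤ i) :
    ([1, 3, 7, 9] : List Int).filter (fun c => c ≤ i) = [1, 3, 7, 9] := by
  rw [List.filter_eq_self]
  intro a ha
  simp only [List.mem_cons, List.not_mem_nil, or_false] at ha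
  rcases ha with rfl | rfl | rfl | rfl <;> simp <;> omega

lemma pvMin_chF : ∀ (m : Nat) (i : Int), i.toNat = m → 1 ≤ i →
    PySem.List.min? (([1, 3, 7, 9] : List Int).filter (fun c => c ≤ i))
      (fun c => pvDpF (i - c)) = some (pvChF i) := by
  intro m
  induction m using Nat.strong_induction_on with
  | _ m ih =>
    intro i hm h1
    by_cases h27 : i ≤ 27
    · interval_cases i <;> decide
    · rw [pv_filter_full i (by omega)]
      have hcong : PySem.List.min? ([1, 3, 7, 9] : List Int) (fun c => pvDpF (i - c))
          = PySem.List.min? ([1, 3, 7, 9] : List Int) (fun c => pvDpF (i - 9 - c) + 1) := by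
        refine pvMin?_congr _ _ _ ?_
        intro x hx
        simp only [List.mem_cons, List.not_mem_nil, or_false] at hx
        have he : ∀ c : Int, c ≤ 9 → 1 ≤ c → pvDpF (i - c) = pvDpF (i - 9 - c) + 1 := by
          intro c hc9 hc1
          have := pvDpF_shift (i - c) (by omega)
          rw [this]
          congr 1
          · congr 1
            ring
        rcases hx with rfl | rfl | rfl | rfl <;> exact he _ (by norm_num) (by norm_num)
      rw [hcong, pvMin?_addone]
      have hprev := ih (i - 9).toNat (by omega) (i - 9) rfl (by omega)
      rw [pv_filter_full (i - 9) (by omega)] at hprev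
      rw [hprev, pvChF_shift i (by omega)]

lemma pvDpF_rec : ∀ (m : Nat) (i : Int), i.toNat = m → 1 ≤ i →
    pvDpF i = pvDpF (i - pvChF i) + 1 := by
  intro m
  induction m using Nat.strong_induction_on with
  | _ m ih =>
    intro i hm h1
    by_cases h27 : i ≤ 27
    · interval_cases i <;> decide
    · have hsh := pvChF_shift i (by omega)
      obtain ⟨hmem, hle⟩ := pvChF_cases (i - 9) (by omega)
      have hc9 : pvChF (i - 9) ≤ 9 := by rcases hmem with h | h | h | h <;> omega
      have hc1 : 1 ≤ pvChF (i - 9) := by rcases hmem with h | h | h | h <;> omega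
      have hprev := ih (i - 9).toNat (by omega) (i - 9) rfl (by omega)
      have h1' := pvDpF_shift i (by omega)
      have h2' := pvDpF_shift (i - pvChF (i - 9)) (by omega)
      rw [hsh]
      have he : i - pvChF (i - 9) - 9 = i - 9 - pvChF (i - 9) := by ring
      rw [h1', h2', he, ← hprev]

-- invariant of the intermediate fold against the closed forms
def pvInv2 (n : Int) (m : Nat) (dp ch : List Int) : Prop :=
  dp.length = (n + 1).toNat ∧ ch.length = (n + 1).toNat ∧
  (∀ k : Int, 0 ≤ k → k ≤ (m : Int) → pvG dp k = pvDpF k) ∧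
  (∀ k : Int, 1 ≤ k → k ≤ (m : Int) → pvG ch k = pvChF k)

lemma pv_step2 (n : Int) (m : Nat) (dp ch : List Int)
    (hmn : (m : Int) + 1 ≤ n) (h : pvInv2 n m dp ch) :
    pvInv2 n (m + 1) (pvStepB (dp, ch) ((m : Int) + 1)).1 (pvStepB (dp, ch) ((m : Int) + 1)).2 := by
  obtain ⟨hdl, hcl, hdp, hch⟩ := h
  set i := (m : Int) + 1 with hi
  have hi1 : 1 ≤ i := by omega
  have hcong : PySem.List.min? (([1, 3, 7, 9] : List Int).filter (fun c => c ≤ i))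
      (fun c => pvG dp (i - c))
      = PySem.List.min? (([1, 3, 7, 9] : List Int).filter (fun c => c ≤ i))
        (fun c => pvDpF (i - c)) := by
    refine pvMin?_congr _ _ _ ?_
    intro x hx
    rw [List.mem_filter] at hx
    obtain ⟨hx1, hx2⟩ := hx
    simp only [List.mem_cons, List.not_mem_nil, or_false] at hx1
    have hx2' : x ≤ i := by simpa using hx2
    have hx1' : 1 ≤ x := by rcases hx1 with rfl | rfl | rfl | rfl <;> norm_num
    exact hdp (i - x) (by omega) (by omega)
  have hmin := pvMin_chF i.toNat i rfl hi1
  obtain ⟨hmem, hle⟩ := pvChF_cases i hi1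
  have hc1 : 1 ≤ pvChF i := by rcases hmem with h | h | h | h <;> omega
  have hstep : pvStepB (dp, ch) i
      = (dp.set i.toNat (pvG dp (i - pvChF i) + 1), ch.set i.toNat (pvChF i)) := by
    simp only [pvStepB, hcong, hmin]
    rfl
  rw [hstep]
  have hiN : i.toNat < (n + 1).toNat := by omega
  refine ⟨by simpa using hdl, by simpa using hcl, ?_, ?_⟩
  · intro k hk0 hk
    by_cases hkm : k ≤ (m : Int)
    · rw [pvG_set_ne _ _ _ _ hk0 (by omega)]
      exact hdp k hk0 hkm
    · have hki : k = i := by omega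
      subst hki
      rw [pvG_set_self _ _ _ hk0 (by omega)]
      rw [hdp (i - pvChF i) (by omega) (by omega)]
      exact (pvDpF_rec i.toNat i rfl hi1).symm
  · intro k hk1 hk
    by_cases hkm : k ≤ (m : Int)
    · rw [pvG_set_ne _ _ _ _ (by omega) (by omega)]
      exact hch k hk1 hkm
    · have hki : k = i := by omega
      subst hki
      rw [pvG_set_self _ _ _ (by omega) (by omega)]

lemma pv_fold2 (n : Int) (_hn : 0 ≤ n) : ∀ (m : Nat), (m : Int) ≤ n →
    pvInv2 n m
      ((PySem.List.pyRange 1 ((m : Int) + 1) 1).foldl pvStepB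
        (List.replicate (n + 1).toNat 0, List.replicate (n + 1).toNat 0)).1
      ((PySem.List.pyRange 1 ((m : Int) + 1) 1).foldl pvStepB
        (List.replicate (n + 1).toNat 0, List.replicate (n + 1).toNat 0)).2 := by
  intro m
  induction m with
  | zero =>
    intro _
    rw [show ((0 : Nat) : Int) + 1 = 1 by norm_num,
      PySem.List.pyRange_one_eq_nil (a := 1) (b := 1) le_rfl]
    refine ⟨by simp, by simp, ?_, ?_⟩
    · intro k hk0 hk
      have hk' : k = 0 := by omega
      subst hk'
      rw [pvG_eq_getD _ _ le_rfl]
      simp only [List.foldl_nil, Int.toNat_zero]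
      rw [pv_getD_replicate]
      decide
    · intro k hk1 hk
      omega
  | succ m ih =>
    intro hm
    have hm' : (m : Int) ≤ n := by push_cast at hm ⊢; omega
    have hmn : (m : Int) + 1 ≤ n := by push_cast at hm; omega
    have hsplit : PySem.List.pyRange 1 (((m + 1 : Nat) : Int) + 1) 1
        = PySem.List.pyRange 1 ((m : Int) + 1) 1 ++ [(m : Int) + 1] := by
      have h2 : (((m + 1 : Nat) : Int) + 1) = ((m : Int) + 1) + 1 := by push_cast; ring
      rw [h2, PySem.List.pyRange_one_succ_right (by omega)]
    rw [hsplit]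
    simp only [List.foldl_append, List.foldl_cons, List.foldl_nil]
    have := pv_step2 n m _ _ hmn (ih hm')
    simpa using this

-- the fuel-indexed walk over the closed-form choice
def pvWalkF : Nat → Int → List Int
  | 0, _ => []
  | fuel + 1, i => if 0 < i then pvChF i :: pvWalkF fuel (i - pvChF i) else []

lemma pv_walkB_eq_F (n : Int) (ch : List Int)
    (hch : ∀ k : Int, 1 ≤ k → k ≤ n → pvG ch k = pvChF k) :
    ∀ (fuel : Nat) (i : Int), 0 ≤ i → i ≤ n → pvWalkB ch fuel i = pvWalkF fuel i := by
  intro fuel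
  induction fuel with
  | zero => intro i _ _; rfl
  | succ f ih =>
    intro i h0 hn
    by_cases hi : 0 < i
    · obtain ⟨hmem, hle⟩ := pvChF_cases i (by omega)
      have hc1 : 1 ≤ pvChF i := by rcases hmem with h | h | h | h <;> omega
      have hg := hch i (by omega) hn
      simp only [pvWalkB, pvWalkF, if_pos hi, hg]
      exact congrArg _ (ih (i - pvChF i) (by omega) (by omega))
    · simp [pvWalkB, pvWalkF, hi]

lemma pvWalkF_fuel : ∀ (f1 : Nat) (f2 : Nat) (i : Int), 0 ≤ i → i < (f1 : Int) → i < (f2 : Int) →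
    pvWalkF f1 i = pvWalkF f2 i := by
  intro f1
  induction f1 with
  | zero => intro f2 i h0 h1 _; omega
  | succ f ih =>
    intro f2 i h0 h1 h2
    cases f2 with
    | zero => omega
    | succ f2 =>
      by_cases hi : 0 < i
      · obtain ⟨hmem, hle⟩ := pvChF_cases i (by omega)
        have hc1 : 1 ≤ pvChF i := by rcases hmem with h | h | h | h <;> omega
        simp only [pvWalkF, if_pos hi]
        exact congrArg _ (ih f2 (i - pvChF i) (by omega) (by push_cast at h1 ⊢; omega)
          (by push_cast at h2 ⊢; omega))
      · simp [pvWalkF, hi]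

def pvOutF (i : Int) : List Int := pvWalkF (i.toNat + 1) i

lemma pvOutF_step (i : Int) (h : 1 ≤ i) : pvOutF i = pvChF i :: pvOutF (i - pvChF i) := by
  obtain ⟨hmem, hle⟩ := pvChF_cases i h
  have hc1 : 1 ≤ pvChF i := by rcases hmem with h' | h' | h' | h' <;> omega
  unfold pvOutF
  rw [show pvWalkF (i.toNat + 1) i = if 0 < i then pvChF i :: pvWalkF i.toNat (i - pvChF i)
      else [] from rfl]
  rw [if_pos (by omega)]
  congr 1
  exact pvWalkF_fuel i.toNat ((i - pvChF i).toNat + 1) (i - pvChF i) (by omega)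
    (by omega) (by omega)

lemma pvOutF_per : ∀ (m : Nat) (i : Int), i.toNat = m → 19 ≤ i →
    pvOutF i = pvOutF (i - 9) ++ [9] := by
  intro m
  induction m using Nat.strong_induction_on with
  | _ m ih =>
    intro i hm h19
    by_cases h27 : i ≤ 27
    · interval_cases i <;> decide
    · have hsh := pvChF_shift i (by omega)
      obtain ⟨hmem, hle⟩ := pvChF_cases i (by omega)
      have hc9 : pvChF i ≤ 9 := by rcases hmem with h | h | h | h <;> omega
      have hc1 : 1 ≤ pvChF i := by rcases hmem with h | h | h | h <;> omega
      rw [pvOutF_step i (by omega), pvOutF_step (i - 9) (by omega), ← hsh]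
      rw [ih (i - pvChF i).toNat (by omega) (i - pvChF i) rfl (by omega)]
      have he : i - pvChF i - 9 = i - 9 - pvChF i := by ring
      rw [he, List.cons_append]

lemma pv_out_eq_alt : ∀ (m : Nat) (n : Int), n.toNat = m → 0 ≤ n →
    pvOutF n = transacts_list_alt n := by
  intro m
  induction m using Nat.strong_induction_on with
  | _ m ih =>
    intro n hm h0
    by_cases h18 : n ≤ 18
    · interval_cases n <;> decide
    · have hper := pvOutF_per n.toNat n rfl (by omega)
      rw [hper, ih (n - 9).toNat (by omega) (n - 9) rfl (by omega)]
      have hk : PySem.Int.floordiv (n - 10) 9 = (n - 10) / 9 :=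
        PySem.Int.floordiv_eq_ediv_of_pos (by norm_num)
      by_cases h27 : n ≤ 27
      · have hk1 : (n - 10) / 9 = 1 := by omega
        show transacts_list_alt (n - 9) ++ [9] = transacts_list_alt n
        unfold transacts_list_alt
        rw [if_pos (by omega : n - 9 ≤ 18), if_neg (by omega)]
        simp only [hk, hk1]
        rw [PySem.List.pyRepeat_singleton]
        norm_num
      · have hk' : PySem.Int.floordiv (n - 9 - 10) 9 = (n - 9 - 10) / 9 :=
          PySem.Int.floordiv_eq_ediv_of_pos (by norm_num)
        show transacts_list_alt (n - 9) ++ [9] = transacts_list_alt n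
        unfold transacts_list_alt
        rw [if_neg (by omega : ¬ (n - 9 ≤ 18)), if_neg (by omega)]
        simp only [hk, hk']
        rw [PySem.List.pyRepeat_singleton, PySem.List.pyRepeat_singleton]
        have hb : n - 9 - 9 * ((n - 9 - 10) / 9) = n - 9 * ((n - 10) / 9) := by omega
        have hkt : ((n - 10) / 9).toNat = ((n - 9 - 10) / 9).toNat + 1 := by omega
        rw [hb, hkt, List.replicate_succ', List.append_assoc]

-- ===== VERDICT (by name: the statement is the Claim_ definition above) =====
theorem transacts_list_spec : Claim_equal_transacts_list := by
  intro n _ hn0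
  have hn : 0 ≤ n := hn0
  unfold Spec_transacts_list
  rw [pv_A_eq_walkB n hn]
  have hinv := pv_fold2 n hn n.toNat (by omega)
  have hc : ((n.toNat : Int) + 1) = n + 1 := by omega
  rw [hc] at hinv
  obtain ⟨_, _, _, hch⟩ := hinv
  rw [pv_walkB_eq_F n _ (fun k hk1 hk2 => hch k hk1 (by omega)) (n.toNat + 1) n hn le_rfl]
  exact pv_out_eq_alt n.toNat n rfl hn
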